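-- pv_equiv track=rewrite | github.com/ahonore/yeswecode | level3/numbers-sprouted/generator/generate.py | find_flag
-- ===== SOURCE A (Python) =====
-- def find_flag(v) -> int:
--     i = max(v)
--     level_start_id = 0
--     found = False
--     level = 0
--     while not found:
--         level_size = 1<<level
--         max_id = level_start_id+level_size
--         if i in v[level_start_id:max_id]:
--             id = v.index(i, level_start_id, max_id) - level_start_id
--             return (id+1)*(level+1)*i
--
--         level_start_id = max_id
--         level += 1
-- ===== SOURCE B (Python) =====
-- def find_flag(v) -> int:
--     m = max(v)
--     p = v.index(m)
--     level = (p + 1).bit_length() - 1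
--     id = p - ((1 << level) - 1)
--     return (id + 1) * (level + 1) * m
-- ===== Notes on version B (the rewrite author's own statement) =====
-- stated objective: simpler
-- what changed: Replaces A's level-by-level loop of slicing, membership test and bounded index search with a single index lookup of the maximum plus a closed-form bit_length computation of the tree level.
import Mathlib
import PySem

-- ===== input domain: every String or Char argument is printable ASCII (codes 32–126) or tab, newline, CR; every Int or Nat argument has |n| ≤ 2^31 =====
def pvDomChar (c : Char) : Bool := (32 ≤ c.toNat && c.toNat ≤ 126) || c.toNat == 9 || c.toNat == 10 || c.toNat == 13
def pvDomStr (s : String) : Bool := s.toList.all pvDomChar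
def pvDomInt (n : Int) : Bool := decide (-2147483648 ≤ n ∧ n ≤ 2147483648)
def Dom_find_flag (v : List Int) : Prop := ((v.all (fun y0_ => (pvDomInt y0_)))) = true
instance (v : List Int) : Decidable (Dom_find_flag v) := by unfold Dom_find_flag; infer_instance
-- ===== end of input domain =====

-- B replaces A's level-by-level slice-and-search loop with one index lookup of the maximum
-- and a closed-form bit_length computation of the tree level (objective: simpler).

-- ===== PORT A =====
-- the while-loop of A; fuel only makes the recursion total (on Pre_ inputs it never runs out,
-- since the max is found at some level before v.length iterations)
def findFlagLoop (v : List Int) (i : Int) (level_start_id : Int) (level : Nat) (fuel : Nat) : Int :=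
  match fuel with
  | 0 => 0
  | fuel + 1 =>
    let level_size : Int := 1 <<< level
    let max_id := level_start_id + level_size
    let seg := PySem.List.slice v (some level_start_id) (some max_id)
    if i ∈ seg then
      -- v.index(i, level_start_id, max_id) = level_start_id + first index of i in v[level_start_id:max_id]
      -- (exact here: 0 ≤ level_start_id and the if-guard guarantees the index exists)
      let id : Int := (level_start_id + ((PySem.List.index? seg i).getD 0 : Int)) - level_start_id
      (id + 1) * ((level : Int) + 1) * i
    else
      findFlagLoop v i max_id (level + 1) fuel

def find_flag (v : List Int) : Int :=
  match PySem.List.max? v (fun x => x) with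
  | none => 0   -- Python: max([]) raises ValueError; excluded by Pre_
  | some i => findFlagLoop v i 0 0 (v.length + 1)

-- ===== PORT B =====
def find_flag_alt (v : List Int) : Int :=
  match PySem.List.max? v (fun x => x) with
  | none => 0   -- Python: max([]) raises ValueError; excluded by Pre_
  | some m =>
    match PySem.List.index? v m with
    | none => 0   -- unreachable: the maximum is a member
    | some p =>
      let level : Nat := PySem.Int.bitLength ((p : Int) + 1) - 1
      let id : Int := (p : Int) - ((1 <<< level) - 1)
      (id + 1) * ((level : Int) + 1) * m

-- ===== PRECONDITION & SPEC =====
-- Pre_ excludes only the empty list, on which Python's max(v) raises ValueError.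
def Pre_find_flag (v : List Int) : Prop := v ≠ []
instance (v : List Int) : Decidable (Pre_find_flag v) := by unfold Pre_find_flag; infer_instance
def pvWitness_find_flag : List Int := [3, 7, 7, 1]

def Spec_find_flag (v : List Int) (out : Int) : Prop := out = find_flag_alt v
instance (v : List Int) (out : Int) : Decidable (Spec_find_flag v out) := by unfold Spec_find_flag; infer_instance

-- ===== CLAIM (what is proved, stated in full; the proofs are below) =====
def Claim_equal_find_flag : Prop := ∀ (v : List Int), Dom_find_flag v → Pre_find_flag v → Spec_find_flag v (find_flag v)

-- ===== LEMMAS AND PROOFS =====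

theorem int_one_shiftLeft (n : Nat) : (((1 <<< n : Nat) : Int)) = ((2 ^ n : Nat) : Int) := by
  simp [Nat.shiftLeft_eq]

-- first-occurrence characterisation => index? value
theorem index?_eq_some_of_getElem {A : Type} [DecidableEq A] (xs : List A) (w : A) (k : Nat)
    (hk : k < xs.length) (hv : xs[k] = w) (hlt : ∀ j (hj : j < k), xs[j] ≠ w) :
    PySem.List.index? xs w = some k := by
  rw [PySem.List.index?_eq_some_iff]
  refine ⟨xs.take k, xs.drop (k + 1), ?_, by rw [List.length_take]; omega, ?_⟩
  · conv_lhs => rw [← List.take_append_drop k xs]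
    rw [List.drop_eq_getElem_cons hk, hv]
  · intro hmem
    obtain ⟨j, hj, hje⟩ := List.mem_iff_getElem.1 hmem
    rw [List.length_take] at hj
    exact hlt j (by omega) (by simpa [List.getElem_take] using hje)

theorem bitLength_bounds (p : Nat) :
    1 ≤ PySem.Int.bitLength ((p : Int) + 1) ∧
    2 ^ (PySem.Int.bitLength ((p : Int) + 1) - 1) ≤ p + 1 ∧
    p + 1 < 2 ^ PySem.Int.bitLength ((p : Int) + 1) := by
  have hcast : ((p : Int) + 1) = ((p + 1 : Nat) : Int) := by push_cast; ring
  have hna : ((p : Int) + 1).natAbs = p + 1 := by rw [hcast, Int.natAbs_natCast]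
  have h1 := PySem.Int.lt_two_pow_bitLength ((p : Int) + 1)
  have h2 := PySem.Int.two_pow_bitLength_le ((p : Int) + 1) (by omega)
  rw [hna] at h1 h2
  refine ⟨?_, h2, h1⟩
  by_contra h
  have h0 : PySem.Int.bitLength ((p : Int) + 1) = 0 := by omega
  rw [h0] at h1
  simp at h1

theorem loop_eq (v : List Int) (i : Int) (p L : Nat)
    (hidx : PySem.List.index? v i = some p)
    (hlo : 2 ^ L ≤ p + 1) (hhi : p + 1 < 2 ^ (L + 1)) :
    ∀ (fuel level : Nat), level ≤ L → L - level < fuel →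
      findFlagLoop v i (((2 ^ level : Nat) : Int) - 1) level fuel =
        ((p : Int) - (((2 ^ L : Nat) : Int) - 1) + 1) * ((L : Int) + 1) * i := by
  obtain ⟨hk, hvp, hfirst⟩ := PySem.List.getElem_of_index?_eq_some hidx
  intro fuel
  induction fuel with
  | zero => intro level _ h; omega
  | succ fuel ih =>
    intro level hle _
    rw [findFlagLoop]
    simp only [int_one_shiftLeft]
    have hpow1 : (1 : Nat) ≤ 2 ^ level := Nat.one_le_two_pow
    have hcast : ((2 ^ level : Nat) : Int) - 1 = (((2 ^ level - 1 : Nat) : Int)) := by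
      rw [Nat.cast_sub hpow1]
      norm_num
    have hseg : PySem.List.slice v (some (((2 ^ level : Nat) : Int) - 1))
        (some ((((2 ^ level : Nat) : Int) - 1) + ((2 ^ level : Nat) : Int))) =
        (v.drop (2 ^ level - 1)).take (2 ^ level) := by
      rw [hcast]
      exact PySem.List.slice_natCast_add v (2 ^ level - 1) (2 ^ level)
    rw [hseg]
    by_cases hcase : level = L
    · -- the level that contains the first maximum
      subst hcase
      have hap : 2 ^ level - 1 ≤ p := by omega
      have h2 : 2 ^ (level + 1) = 2 * 2 ^ level := by rw [pow_succ]; ring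
      have hrel : p - (2 ^ level - 1) < 2 ^ level := by omega
      have hlen : p - (2 ^ level - 1) < ((v.drop (2 ^ level - 1)).take (2 ^ level)).length := by
        rw [List.length_take, List.length_drop]
        omega
      have hgetseg : ∀ j (hj : j < ((v.drop (2 ^ level - 1)).take (2 ^ level)).length),
          ((v.drop (2 ^ level - 1)).take (2 ^ level))[j] = v[2 ^ level - 1 + j]'(by
            rw [List.length_take, List.length_drop] at hj; omega) := by
        intro j hj
        simp [List.getElem_take, List.getElem_drop]
      have haddpa : 2 ^ level - 1 + (p - (2 ^ level - 1)) = p := by omega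
      have hmem : i ∈ (v.drop (2 ^ level - 1)).take (2 ^ level) := by
        rw [List.mem_iff_getElem]
        refine ⟨p - (2 ^ level - 1), hlen, ?_⟩
        rw [hgetseg (p - (2 ^ level - 1)) hlen]
        simp only [haddpa]
        exact hvp
      rw [if_pos hmem]
      have hidxseg : PySem.List.index? ((v.drop (2 ^ level - 1)).take (2 ^ level)) i
          = some (p - (2 ^ level - 1)) := by
        apply index?_eq_some_of_getElem _ _ _ hlen
        · rw [hgetseg (p - (2 ^ level - 1)) hlen]
          simp only [haddpa]
          exact hvp
        · intro j hj
          rw [hgetseg j (by omega)]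
          exact hfirst (2 ^ level - 1 + j) (by omega)
      rw [hidxseg]
      simp only [Option.getD_some]
      have hpa : ((p - (2 ^ level - 1) : Nat) : Int) = (p : Int) - (((2 ^ level : Nat) : Int) - 1) := by
        rw [Nat.cast_sub hap, Nat.cast_sub hpow1]
        norm_num
      rw [← hpa]
      ring
    · -- the maximum is not in this level: every slice element is some v[j] with j < p
      have hlvlt : level < L := by omega
      have hnot : i ∉ (v.drop (2 ^ level - 1)).take (2 ^ level) := by
        intro hmem
        obtain ⟨j, hj, hje⟩ := List.mem_iff_getElem.1 hmem
        rw [List.length_take, List.length_drop] at hj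
        have hjlen : 2 ^ level - 1 + j < v.length := by omega
        have hvj : v[2 ^ level - 1 + j]'hjlen = i := by
          rw [← hje]
          simp [List.getElem_take, List.getElem_drop]
        have h21 : 2 ^ (level + 1) ≤ 2 ^ L := Nat.pow_le_pow_right (by norm_num) hlvlt
        have h2 : 2 ^ (level + 1) = 2 * 2 ^ level := by rw [pow_succ]; ring
        have hpow1 : (1 : Nat) ≤ 2 ^ level := Nat.one_le_two_pow
        exact hfirst (2 ^ level - 1 + j) (by omega) hvj
      rw [if_neg hnot]
      have hmaxid : ((((2 ^ level : Nat) : Int) - 1) + ((2 ^ level : Nat) : Int)) =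
          ((2 ^ (level + 1) : Nat) : Int) - 1 := by
        push_cast [pow_succ]
        ring
      rw [hmaxid]
      exact ih (level + 1) (by omega) (by omega)

-- ===== VERDICT (by name: the statement is the Claim_ definition above) =====
theorem find_flag_spec : Claim_equal_find_flag := by
  intro v _ hpre
  unfold Spec_find_flag
  cases hmax : PySem.List.max? v (fun x => x) with
  | none =>
    rw [PySem.List.max?_eq_none_iff] at hmax
    exact absurd hmax hpre
  | some i =>
    have hmem : i ∈ v := PySem.List.max?_mem hmax
    have hsome : (PySem.List.index? v i).isSome := by
      rw [PySem.List.index?_isSome_iff]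
      exact hmem
    obtain ⟨p, hidx⟩ := Option.isSome_iff_exists.mp hsome
    obtain ⟨hk, _, _⟩ := PySem.List.getElem_of_index?_eq_some hidx
    obtain ⟨hbl1, hlo, hhi⟩ := bitLength_bounds p
    have hblL : PySem.Int.bitLength ((p : Int) + 1)
        = (PySem.Int.bitLength ((p : Int) + 1) - 1) + 1 := by omega
    rw [hblL] at hhi
    have hself : (PySem.Int.bitLength ((p : Int) + 1) - 1)
        < 2 ^ (PySem.Int.bitLength ((p : Int) + 1) - 1) := Nat.lt_two_pow_self
    have hA : find_flag v = findFlagLoop v i 0 0 (v.length + 1) := by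
      unfold find_flag
      rw [hmax]
    have hB : find_flag_alt v =
        ((p : Int) - (((1 <<< (PySem.Int.bitLength ((p : Int) + 1) - 1) : Nat) : Int) - 1) + 1) *
          (((PySem.Int.bitLength ((p : Int) + 1) - 1 : Nat) : Int) + 1) * i := by
      unfold find_flag_alt
      simp only [hmax, hidx]
    have hzero : (0 : Int) = ((2 ^ 0 : Nat) : Int) - 1 := by norm_num
    rw [hA, hB, hzero, loop_eq v i p (PySem.Int.bitLength ((p : Int) + 1) - 1) hidx hlo hhi
      (v.length + 1) 0 (by omega) (by omega)]
    simp [Nat.shiftLeft_eq]
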